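-- pv_equiv track=rewrite | github.com/ronit450/Habib-University-Semester2-DSA-Programs | Lab10/rk06451_Lab10.py | printIn_OutDegree
-- ===== SOURCE A (Python) =====
-- def printIn_OutDegree(graph):
--     string = ""
--     sum_of_out_degree = 0
--     sum_of_indegree = 0
--     lst_of_indegree = {}
--     lst_of_outdegree = {}
--     for i in graph:
--         indegre = 0
--         out_degree = len(graph[i])
--         lst_of_outdegree[i] = (out_degree)
--         sum_of_out_degree += out_degree
--         for j in graph:
--             for k in range(len(graph[j])):
--                 if graph[j][k][0] == i :
--                     indegre += 1
--                     sum_of_indegree += 1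
--                 lst_of_indegree[i] = indegre
--         string += ((str(i) +' => In-Degree:'+ str(indegre)+","+ " Out-Degree "+ str(out_degree)) +'\n')
--     return string, sum_of_out_degree, sum_of_indegree, lst_of_indegree , lst_of_outdegree
-- ===== SOURCE B (Python) =====
-- def printIn_OutDegree(graph):
--     # one pass over all edges to count in-degrees, then build everything per key
--     indeg = {}
--     for edges in graph.values():
--         for e in edges:
--             indeg[e[0]] = indeg.get(e[0], 0) + 1
--     lst_of_outdegree = {i: len(edges) for i, edges in graph.items()}
--     sum_of_out_degree = sum(lst_of_outdegree.values())
--     lst_of_indegree = {i: indeg.get(i, 0) for i in graph}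
--     sum_of_indegree = sum(lst_of_indegree.values())
--     string = "".join(
--         "{} => In-Degree:{}, Out-Degree {}\n".format(i, lst_of_indegree[i], lst_of_outdegree[i])
--         for i in graph)
--     return string, sum_of_out_degree, sum_of_indegree, lst_of_indegree, lst_of_outdegree
-- ===== Notes on version B (the rewrite author's own statement) =====
-- stated objective: faster
-- what changed: A rescans the entire graph (all adjacency lists, via repeated dict lookups) once per vertex to count its in-degree; B makes a single pass over all edges building an in-degree counter dict, then builds the report string, sums and both degree dicts directly per key.
-- intended difference: On nonempty graphs whose adjacency lists are all empty, A returns {} as lst_of_indegree (the assignment sits inside the innermost edge loop and never runs) while B returns the intended dict mapping every vertex to 0, as it does on every other graph. — e.g. on printIn_OutDegree([(0, [])]): A returns ("0 => In-Degree:0, Out-Degree 0\n", 0, 0, [], [(0, 0)]), B returns ("0 => In-Degree:0, Out-Degree 0\n", 0, 0, [(0, 0)], [(0, 0)])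
import Mathlib
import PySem

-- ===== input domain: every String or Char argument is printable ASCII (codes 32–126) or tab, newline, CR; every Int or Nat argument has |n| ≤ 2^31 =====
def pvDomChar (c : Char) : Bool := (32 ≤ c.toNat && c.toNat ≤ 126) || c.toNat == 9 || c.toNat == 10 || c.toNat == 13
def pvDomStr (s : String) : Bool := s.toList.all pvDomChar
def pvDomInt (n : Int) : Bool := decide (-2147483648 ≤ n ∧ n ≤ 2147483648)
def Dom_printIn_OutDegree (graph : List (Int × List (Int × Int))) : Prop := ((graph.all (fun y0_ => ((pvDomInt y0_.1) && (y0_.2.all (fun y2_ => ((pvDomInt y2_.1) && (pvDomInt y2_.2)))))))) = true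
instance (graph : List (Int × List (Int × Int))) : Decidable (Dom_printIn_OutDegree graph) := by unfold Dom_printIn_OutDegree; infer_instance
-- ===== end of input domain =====

-- B replaces A's per-key rescan of the whole graph by one pass over all edges counting
-- in-degrees into a dict, then builds every output component per key.

-- ===== PORT A =====
-- graph[i] (dict lookup; in A, i is always a present key, so the default is never used)
def pvLookup (graph : List (Int × List (Int × Int))) (i : Int) : List (Int × Int) :=
  (PySem.Dict.mk graph).getD i []

-- body of 'for k in range(len(graph[j]))': state (indegre, sum_of_indegree, lst_of_indegree)
def pvInnerStep (i : Int) (t : Int × Int × PySem.Dict Int Int) (e : Int × Int) :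
    Int × Int × PySem.Dict Int Int :=
  let t1 := if e.1 == i then (t.1 + 1, t.2.1 + 1, t.2.2) else t
  (t1.1, t1.2.1, t1.2.2.insert i t1.1)

-- body of 'for i in graph': state (string, sum_of_out_degree, sum_of_indegree,
-- lst_of_indegree, lst_of_outdegree)
def pvOuterStep (graph : List (Int × List (Int × Int)))
    (st : String × Int × Int × PySem.Dict Int Int × PySem.Dict Int Int)
    (p : Int × List (Int × Int)) :
    String × Int × Int × PySem.Dict Int Int × PySem.Dict Int Int :=
  let i := p.1
  let out_degree : Int := (pvLookup graph i).length
  let dout := st.2.2.2.2.insert i out_degree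
  let sumOut := st.2.1 + out_degree
  let inner := graph.foldl (fun t q => (pvLookup graph q.1).foldl (pvInnerStep i) t)
    (0, st.2.2.1, st.2.2.2.1)
  (st.1 ++ (PySem.Int.toStr i ++ " => In-Degree:" ++ PySem.Int.toStr inner.1 ++ "," ++
            " Out-Degree " ++ PySem.Int.toStr out_degree ++ "\n"),
   sumOut, inner.2.1, inner.2.2, dout)

def printIn_OutDegree (graph : List (Int × List (Int × Int))) :
    String × Int × Int × (List (Int × Int)) × (List (Int × Int)) :=
  let st := graph.foldl (pvOuterStep graph) ("", 0, 0, PySem.Dict.empty, PySem.Dict.empty)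
  (st.1, st.2.1, st.2.2.1, st.2.2.2.1.items, st.2.2.2.2.items)

-- ===== PORT B =====
def printIn_OutDegree_alt (graph : List (Int × List (Int × Int))) :
    String × Int × Int × (List (Int × Int)) × (List (Int × Int)) :=
  let indeg : PySem.Dict Int Int :=
    graph.foldl (fun d p => p.2.foldl (fun d e => d.insert e.1 (d.getD e.1 0 + 1)) d)
      PySem.Dict.empty
  let dout := graph.map (fun p => (p.1, (p.2.length : Int)))
  let sumOut := (dout.map Prod.snd).foldl (· + ·) 0
  let din := graph.map (fun p => (p.1, indeg.getD p.1 0))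
  let sumIn := (din.map Prod.snd).foldl (· + ·) 0
  let s := String.join (graph.map (fun p =>
    PySem.Int.toStr p.1 ++ " => In-Degree:" ++ PySem.Int.toStr (indeg.getD p.1 0) ++
    ", Out-Degree " ++ PySem.Int.toStr (p.2.length : Int) ++ "\n"))
  (s, sumOut, sumIn, din, dout)

-- ===== PRECONDITION & SPEC =====
-- Pre_ excludes association lists with duplicate keys: a Python dict argument can never
-- contain them, and which entry such a list 'means' is a representation accident.
def Pre_printIn_OutDegree (graph : List (Int × List (Int × Int))) : Prop :=
  (graph.map Prod.fst).Nodup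
instance (graph : List (Int × List (Int × Int))) : Decidable (Pre_printIn_OutDegree graph) := by
  unfold Pre_printIn_OutDegree; infer_instance

def pvWitness_printIn_OutDegree : (List (Int × List (Int × Int))) :=
  [(1, [(2, 5), (1, 0)]), (2, [(1, 3)])]

-- On nonempty graphs whose adjacency lists are ALL empty, A returns {} as lst_of_indegree
-- (its assignment sits inside the innermost edge loop and never runs) while B returns the
-- intended dict mapping every vertex to in-degree 0, as it does on every other graph.
def D_printIn_OutDegree (graph : List (Int × List (Int × Int))) : Prop :=
  graph ≠ [] ∧ ∀ p ∈ graph, p.2 = []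
instance (graph : List (Int × List (Int × Int))) : Decidable (D_printIn_OutDegree graph) := by
  unfold D_printIn_OutDegree; infer_instance

def Spec_printIn_OutDegree (graph : List (Int × List (Int × Int)))
    (out : String × Int × Int × (List (Int × Int)) × (List (Int × Int))) : Prop :=
  ¬ D_printIn_OutDegree graph → out = printIn_OutDegree_alt graph
instance (graph : List (Int × List (Int × Int)))
    (out : String × Int × Int × (List (Int × Int)) × (List (Int × Int))) :
    Decidable (Spec_printIn_OutDegree graph out) := by
  unfold Spec_printIn_OutDegree; infer_instance

def pvDiffWitness_printIn_OutDegree : (List (Int × List (Int × Int))) := [(0, [])]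
def pvDiffWitnessOut_printIn_OutDegree :
    (String × Int × Int × (List (Int × Int)) × (List (Int × Int))) ×
    (String × Int × Int × (List (Int × Int)) × (List (Int × Int))) :=
  (("0 => In-Degree:0, Out-Degree 0\n", 0, 0, [], [(0, 0)]),
   ("0 => In-Degree:0, Out-Degree 0\n", 0, 0, [(0, 0)], [(0, 0)]))

-- ===== CLAIM =====
def Claim_unchanged_printIn_OutDegree : Prop :=
  ∀ (graph : List (Int × List (Int × Int))), Dom_printIn_OutDegree graph →
    Pre_printIn_OutDegree graph → Spec_printIn_OutDegree graph (printIn_OutDegree graph)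
def Claim_changed_printIn_OutDegree : Prop :=
  Dom_printIn_OutDegree (pvDiffWitness_printIn_OutDegree) ∧
  Pre_printIn_OutDegree (pvDiffWitness_printIn_OutDegree) ∧
  D_printIn_OutDegree (pvDiffWitness_printIn_OutDegree) ∧
  printIn_OutDegree (pvDiffWitness_printIn_OutDegree) = pvDiffWitnessOut_printIn_OutDegree.1 ∧
  printIn_OutDegree_alt (pvDiffWitness_printIn_OutDegree) = pvDiffWitnessOut_printIn_OutDegree.2 ∧
  pvDiffWitnessOut_printIn_OutDegree.1 ≠ pvDiffWitnessOut_printIn_OutDegree.2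
def Claim_exact_printIn_OutDegree : Prop :=
  ∀ (graph : List (Int × List (Int × Int))), Dom_printIn_OutDegree graph →
    Pre_printIn_OutDegree graph → D_printIn_OutDegree graph →
    printIn_OutDegree graph ≠ printIn_OutDegree_alt graph

-- ===== LEMMAS AND PROOFS =====

-- overwriting the same key twice keeps only the last value
theorem insert_insert_self (d : PySem.Dict Int Int) (i v w : Int) :
    (d.insert i v).insert i w = d.insert i w := by
  have hc : (d.insert i v).contains i = true := PySem.Dict.contains_insert_self d i v
  by_cases hd : d.contains i = true
  · simp only [PySem.Dict.insert, hd, if_true] at hc ⊢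
    rw [if_pos hc]
    congr 1
    simp only [List.map_map]
    apply List.map_congr_left
    intro p _
    by_cases hp : p.1 = i <;> simp [hp]
  · simp only [PySem.Dict.insert, hd, Bool.false_eq_true, if_false] at hc ⊢
    rw [if_pos hc]
    congr 1
    simp only [List.map_append]
    have hmap : ∀ (u : Int),
        List.map (fun p : Int × Int => if p.1 = i then (i, u) else p) d.items = d.items := by
      intro u
      conv_rhs => rw [← List.map_id d.items]
      apply List.map_congr_left
      intro p hp
      have hne : p.1 ≠ i := by
        intro h
        apply hd
        rw [PySem.Dict.contains_iff_mem_keys]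
        simp only [PySem.Dict.keys, List.mem_map]
        exact ⟨p, hp, h⟩
      simp [hne]
    simp [hmap]

theorem insert_of_not_contains (d : PySem.Dict Int Int) (k v : Int)
    (h : d.contains k = false) :
    d.insert k v = PySem.Dict.mk (d.items ++ [(k, v)]) := by
  simp [PySem.Dict.insert, h]

theorem join_foldl (l : List String) : ∀ s : String,
    l.foldl (fun r t => r ++ t) s = s ++ String.join l := by
  induction l with
  | nil => intro s; simp [String.join, String.append_empty]
  | cons a l ih =>
    intro s
    simp only [List.foldl_cons]
    rw [ih]
    have h2 : String.join (a :: l) = a ++ String.join l := by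
      show List.foldl (fun r t => r ++ t) ("" ++ a) l = _
      rw [ih ("" ++ a), String.empty_append]
    rw [h2, String.append_assoc]

theorem join_cons (a : String) (l : List String) :
    String.join (a :: l) = a ++ String.join l := by
  show List.foldl (fun r t => r ++ t) ("" ++ a) l = _
  rw [join_foldl l ("" ++ a), String.empty_append]

-- number of edges of E pointing at i
def pvCnt (i : Int) (E : List (Int × Int)) : Int := (E.countP (fun e => e.1 == i) : Int)

-- all edges of the graph, in iteration order
def pvE (graph : List (Int × List (Int × Int))) : List (Int × Int) :=
  graph.flatMap (fun p => p.2)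

def pvLine (graph : List (Int × List (Int × Int))) (p : Int × List (Int × Int)) : String :=
  PySem.Int.toStr p.1 ++ " => In-Degree:" ++ PySem.Int.toStr (pvCnt p.1 (pvE graph)) ++ "," ++
  " Out-Degree " ++ PySem.Int.toStr ((p.2.length : Int)) ++ "\n"

theorem lookup_eq (graph : List (Int × List (Int × Int)))
    (hnd : (graph.map Prod.fst).Nodup) (q : Int × List (Int × Int)) (hq : q ∈ graph) :
    pvLookup graph q.1 = q.2 := by
  unfold pvLookup
  exact PySem.Dict.getD_of_mem_items (PySem.Dict.mk graph)
    (by simpa using hq) (by simpa [PySem.Dict.keys] using hnd) []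

-- the innermost loop of A, over an edge list E, starting from (a, s, d)
theorem inner_fold_char (i : Int) (E : List (Int × Int)) :
    ∀ (a s : Int) (d : PySem.Dict Int Int),
    E.foldl (pvInnerStep i) (a, s, d)
    = (a + pvCnt i E, s + pvCnt i E,
       if E.isEmpty then d else d.insert i (a + pvCnt i E)) := by
  induction E with
  | nil => intro a s d; simp [pvCnt]
  | cons e E ih =>
    intro a s d
    simp only [List.foldl_cons, pvInnerStep]
    by_cases he : (e.1 == i) = true
    · simp only [he, if_true]
      rw [ih]
      rcases E with _ | ⟨f, F⟩
      · simp [pvCnt, he]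
      · simp only [List.isEmpty_cons, pvCnt, List.countP_cons, he, if_true]
        rw [insert_insert_self]
        simp only [Prod.mk.injEq]
        refine ⟨by push_cast; ring, by push_cast; ring, ?_⟩
        simp only [if_neg (by simp : ¬(false = true))]
        congr 1
        push_cast; ring
    · simp only [he]
      rw [ih]
      rcases E with _ | ⟨f, F⟩
      · simp [pvCnt, he]
      · simp only [List.isEmpty_cons, pvCnt, List.countP_cons, he]
        rw [insert_insert_self]
        simp

-- the middle loop of A: over all adjacency lists of the graph
theorem middle_fold_char (graph : List (Int × List (Int × Int)))
    (hnd : (graph.map Prod.fst).Nodup) (i : Int) (a s : Int) (d : PySem.Dict Int Int) :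
    graph.foldl (fun t q => (pvLookup graph q.1).foldl (pvInnerStep i) t) (a, s, d)
    = (a + pvCnt i (pvE graph), s + pvCnt i (pvE graph),
       if (pvE graph).isEmpty then d else d.insert i (a + pvCnt i (pvE graph))) := by
  rw [PySem.List.foldl_congr_mem graph
    (fun t q => (pvLookup graph q.1).foldl (pvInnerStep i) t)
    (fun t q => q.2.foldl (pvInnerStep i) t) (a, s, d)
    (fun acc q hq => by
      show List.foldl (pvInnerStep i) acc (pvLookup graph q.1)
          = List.foldl (pvInnerStep i) acc q.2
      rw [lookup_eq graph hnd q hq])]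
  rw [show (List.foldl (fun t q => q.2.foldl (pvInnerStep i) t) (a, s, d) graph)
      = (graph.flatMap (fun p => p.2)).foldl (pvInnerStep i) (a, s, d) from
    (List.foldl_flatMap).symm]
  exact inner_fold_char i (graph.flatMap (fun p => p.2)) a s d

-- the outer loop of A, characterised over any suffix l of keys still to process
theorem outer_fold_char (graph : List (Int × List (Int × Int)))
    (hnd : (graph.map Prod.fst).Nodup) (hne : ¬ (pvE graph).isEmpty = true) :
    ∀ (l : List (Int × List (Int × Int))), (∀ p ∈ l, p ∈ graph) →
      (l.map Prod.fst).Nodup →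
    ∀ (s : String) (so si : Int) (din dout : PySem.Dict Int Int),
      (∀ p ∈ l, din.contains p.1 = false) → (∀ p ∈ l, dout.contains p.1 = false) →
    l.foldl (pvOuterStep graph) (s, so, si, din, dout)
    = (s ++ String.join (l.map (pvLine graph)),
       so + (l.map (fun p => (p.2.length : Int))).sum,
       si + (l.map (fun p => pvCnt p.1 (pvE graph))).sum,
       PySem.Dict.mk (din.items ++ l.map (fun p => (p.1, pvCnt p.1 (pvE graph)))),
       PySem.Dict.mk (dout.items ++ l.map (fun p => (p.1, (p.2.length : Int))))) := by
  intro l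
  induction l with
  | nil =>
    intro _ _ s so si din dout _ _
    simp [String.join, String.append_empty]
  | cons p l ih =>
    intro hsub hndl s so si din dout hdin hdout
    have hp : p ∈ graph := hsub p (by simp)
    have hod : pvLookup graph p.1 = p.2 := lookup_eq graph hnd p hp
    simp only [List.foldl_cons]
    have hstep : pvOuterStep graph (s, so, si, din, dout) p
        = (s ++ pvLine graph p, so + (p.2.length : Int), si + pvCnt p.1 (pvE graph),
           PySem.Dict.mk (din.items ++ [(p.1, pvCnt p.1 (pvE graph))]),
           PySem.Dict.mk (dout.items ++ [(p.1, (p.2.length : Int))])) := by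
      simp only [pvOuterStep, hod]
      rw [middle_fold_char graph hnd p.1 0 si din]
      rw [if_neg hne]
      rw [insert_of_not_contains din p.1 _ (hdin p (by simp))]
      rw [insert_of_not_contains dout p.1 _ (hdout p (by simp))]
      simp [pvLine, String.append_assoc]
    rw [hstep]
    have hnd2 := List.nodup_cons.mp (show (p.1 :: l.map Prod.fst).Nodup from hndl)
    have hpl : p.1 ∉ l.map Prod.fst := hnd2.1
    have hcontains : ∀ (dd : PySem.Dict Int Int) (c : Int),
        (∀ q ∈ p :: l, dd.contains q.1 = false) →
        ∀ q ∈ l, (PySem.Dict.mk (dd.items ++ [(p.1, c)])).contains q.1 = false := by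
      intro dd c hdd q hq
      have h1 : dd.contains q.1 = false := hdd q (List.mem_cons_of_mem _ hq)
      have hqne : p.1 ≠ q.1 := by
        intro h
        exact hpl (h ▸ List.mem_map_of_mem hq)
      simp only [PySem.Dict.contains] at h1 ⊢
      simp only [List.any_append, List.any_cons, List.any_nil, Bool.or_false,
        Bool.or_eq_false_iff]
      exact ⟨h1, by simp [hqne]⟩
    rw [ih (fun q hq => hsub q (List.mem_cons_of_mem _ hq)) hnd2.2 _ _ _ _ _
      (hcontains din _ hdin) (hcontains dout _ hdout)]
    simp only [List.map_cons, List.sum_cons, join_cons, Prod.mk.injEq]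
    refine ⟨by rw [String.append_assoc], by ring, by ring, by simp, by simp⟩

-- B's in-degree counter agrees with the edge count
theorem indeg_getD (graph : List (Int × List (Int × Int))) (i : Int) :
    (graph.foldl (fun d p => p.2.foldl (fun d e => d.insert e.1 (d.getD e.1 0 + 1)) d)
      PySem.Dict.empty).getD i 0 = pvCnt i (pvE graph) := by
  have h1 : (graph.foldl
        (fun (d : PySem.Dict Int Int) p => p.2.foldl (fun d e => d.insert e.1 (d.getD e.1 0 + 1)) d)
        PySem.Dict.empty)
      = (graph.flatMap (fun p => p.2)).foldl
          (fun (d : PySem.Dict Int Int) e => d.insert e.1 (d.getD e.1 0 + 1)) PySem.Dict.empty :=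
    List.foldl_flatMap.symm
  have h2 : ((graph.flatMap (fun p => p.2)).foldl
        (fun (d : PySem.Dict Int Int) e => d.insert e.1 (d.getD e.1 0 + 1)) PySem.Dict.empty)
      = ((graph.flatMap (fun p => p.2)).map Prod.fst).foldl
          (fun (d : PySem.Dict Int Int) x => d.insert x (d.getD x 0 + 1)) PySem.Dict.empty :=
    (List.foldl_map (f := Prod.fst)
      (g := fun (d : PySem.Dict Int Int) x => d.insert x (d.getD x 0 + 1))
      (l := graph.flatMap (fun p => p.2)) (init := PySem.Dict.empty)).symm
  have h3 := PySem.Dict.getD_foldl_insert_add_one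
    ((graph.flatMap (fun p => p.2)).map Prod.fst) PySem.Dict.empty i
  calc (graph.foldl
        (fun (d : PySem.Dict Int Int) p => p.2.foldl (fun d e => d.insert e.1 (d.getD e.1 0 + 1)) d)
        PySem.Dict.empty).getD i 0
      = (((graph.flatMap (fun p => p.2)).map Prod.fst).foldl
          (fun (d : PySem.Dict Int Int) x => d.insert x (d.getD x 0 + 1)) PySem.Dict.empty).getD i 0 :=
        congrArg (fun d : PySem.Dict Int Int => d.getD i 0) (h1.trans h2)
    _ = PySem.Dict.empty.getD i 0
        + (((graph.flatMap (fun p => p.2)).map Prod.fst).count i : Int) := h3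
    _ = pvCnt i (pvE graph) := by
        simp [pvCnt, pvE, List.count, List.countP_map, Function.comp_def]

-- A's in-degree dict stays empty when every adjacency list is empty
theorem outer_fold_din_fixed (graph : List (Int × List (Int × Int)))
    (hnd : (graph.map Prod.fst).Nodup) (hall : ∀ p ∈ graph, p.2 = []) :
    ∀ (l : List (Int × List (Int × Int))),
    ∀ (st : String × Int × Int × PySem.Dict Int Int × PySem.Dict Int Int),
    (l.foldl (pvOuterStep graph) st).2.2.2.1 = st.2.2.2.1 := by
  intro l
  induction l with
  | nil => intro st; rfl
  | cons p l ih =>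
    intro st
    rw [List.foldl_cons, ih]
    simp only [pvOuterStep]
    rw [PySem.List.foldl_congr_mem graph _ (fun t _ => t) _
      (by
        intro acc q hq
        rw [lookup_eq graph hnd q hq, hall q hq]
        rfl)]
    rw [List.foldl_fixed]

-- ===== VERDICT =====
theorem printIn_OutDegree_spec : Claim_unchanged_printIn_OutDegree := by
  intro graph _ hnd hD
  by_cases hg : graph = []
  · subst hg; rfl
  · have hne : ¬ (pvE graph).isEmpty = true := by
      rw [List.isEmpty_iff]
      intro h
      exact hD ⟨hg, List.flatMap_eq_nil_iff.mp h⟩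
    have hA := outer_fold_char graph hnd hne graph (fun p hp => hp) hnd
      "" 0 0 PySem.Dict.empty PySem.Dict.empty
      (fun p _ => PySem.Dict.contains_empty p.1) (fun p _ => PySem.Dict.contains_empty p.1)
    show printIn_OutDegree graph = printIn_OutDegree_alt graph
    unfold printIn_OutDegree
    rw [hA]
    unfold printIn_OutDegree_alt
    have hemp : PySem.Dict.empty.items = ([] : List (Int × Int)) := rfl
    simp only [hemp, List.nil_append, String.empty_append, zero_add,
      Prod.mk.injEq, List.map_map]
    refine ⟨?_, ?_, ?_, ?_, ?_⟩
    · congr 1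
      apply List.map_congr_left
      intro p _
      simp [pvLine, indeg_getD, String.append_assoc]
    · rw [← List.sum_eq_foldl]
      simp [Function.comp_def]
    · rw [← List.sum_eq_foldl]
      congr 1
      apply List.map_congr_left
      intro p _
      simp [indeg_getD]
    · apply List.map_congr_left
      intro p _
      simp [indeg_getD]
    · trivial
theorem printIn_OutDegree_changed : Claim_changed_printIn_OutDegree := by
  unfold Claim_changed_printIn_OutDegree
  exact ⟨by decide, by decide, by decide, by decide, by decide, by decide⟩
theorem printIn_OutDegree_tight : Claim_exact_printIn_OutDegree := by
  intro graph _ hnd hD heq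
  have h4 : (printIn_OutDegree graph).2.2.2.1 = (printIn_OutDegree_alt graph).2.2.2.1 := by
    rw [heq]
  rw [show (printIn_OutDegree graph).2.2.2.1
      = (graph.foldl (pvOuterStep graph)
          ("", 0, 0, PySem.Dict.empty, PySem.Dict.empty)).2.2.2.1.items from rfl] at h4
  rw [outer_fold_din_fixed graph hnd hD.2 graph] at h4
  have hb : (printIn_OutDegree_alt graph).2.2.2.1
      = graph.map (fun p => (p.1, (graph.foldl
          (fun d p => p.2.foldl (fun d e => d.insert e.1 (d.getD e.1 0 + 1)) d)
          PySem.Dict.empty).getD p.1 0)) := rfl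
  rw [hb] at h4
  rcases graph with _ | ⟨p, l⟩
  · exact hD.1 rfl
  · simp [PySem.Dict.empty] at h4
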